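-- pv_equiv track=rewrite | github.com/freage/algorithms | number-theory/millerrabin.py | findtwopow
-- ===== SOURCE A (Python) =====
-- def findtwopow(n):
--     """
--     decompose n = 2**twopow * r
--     """
--     r = n
--     twopow = 0
--     while r % 2 == 0:
--         r >>= 1
--         twopow += 1
--     assert r*(1<<twopow) == n
--     return r, twopow
-- ===== SOURCE B (Python) =====
-- def findtwopow(n):
--     """
--     decompose n = 2**twopow * r
--     """
--     twopow = (n & -n).bit_length() - 1
--     r = n >> twopow
--     assert r*(1 << twopow) == n
--     return r, twopow
-- ===== Notes on version B (the rewrite author's own statement) =====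
-- stated objective: idiomatic
-- what changed: The per-bit while-loop is replaced by the closed-form low-bit trick: twopow = (n & -n).bit_length() - 1 and r = n >> twopow, computing the trailing-zero count with a couple of O(1)-per-word bignum operations instead of iterating once per factor of two. Pre_ excludes only n = 0, where A's while-loop never terminates.
-- outside the precondition, e.g. on findtwopow(0): A does not finish within the time limit, B raises ValueError
import Mathlib
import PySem

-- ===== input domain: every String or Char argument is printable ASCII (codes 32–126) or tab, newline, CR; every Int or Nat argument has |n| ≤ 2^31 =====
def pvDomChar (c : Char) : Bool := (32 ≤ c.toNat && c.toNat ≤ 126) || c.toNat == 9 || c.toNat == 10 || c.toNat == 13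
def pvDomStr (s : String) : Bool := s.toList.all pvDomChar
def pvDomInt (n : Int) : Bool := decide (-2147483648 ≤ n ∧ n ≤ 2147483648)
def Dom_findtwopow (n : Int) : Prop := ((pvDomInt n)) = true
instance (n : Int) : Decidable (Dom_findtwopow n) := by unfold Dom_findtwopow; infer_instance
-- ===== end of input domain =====

-- B replaces A's per-bit while-loop by the closed-form low-bit trick
-- twopow = (n & -n).bit_length() - 1, r = n >> twopow (idiomatic; no loop).

-- ===== PORT A =====
-- the while-loop of A; the fuel argument only makes the recursion structural
-- (for any n ≠ 0 the fuel n.natAbs + 1 exceeds the number of iterations)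
def findtwopowLoop : Nat → Int → Int → Int × Int
  | 0, r, twopow => (r, twopow)
  | fuel + 1, r, twopow =>
      if PySem.Int.mod r 2 = 0 then
        findtwopowLoop fuel (r >>> (1 : Nat)) (twopow + 1)   -- r >>= 1; twopow += 1
      else (r, twopow)

def findtwopow (n : Int) : Int × Int :=
  -- r = n; twopow = 0; while r % 2 == 0: …   (the assert always holds and returns no value)
  findtwopowLoop (n.natAbs + 1) n 0

-- ===== PORT B =====
def findtwopow_alt (n : Int) : Int × Int :=
  let twopow : Int := (PySem.Int.bitLength (PySem.Int.band n (-n)) : Int) - 1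
  -- n >> twopow; Python raises on a negative shift count (only at n = 0, outside Pre_),
  -- the guard only keeps the definition total there
  let r : Int := if 0 ≤ twopow then n >>> twopow.toNat else 0
  (r, twopow)

-- ===== PRECONDITION & SPEC =====
-- Pre_ excludes exactly n = 0, where A's while-loop never terminates (and B raises ValueError).
def Pre_findtwopow (n : Int) : Prop := n ≠ 0
instance (n : Int) : Decidable (Pre_findtwopow n) := by unfold Pre_findtwopow; infer_instance
def pvWitness_findtwopow : Int := 12

def Spec_findtwopow (n : Int) (out : Int × Int) : Prop := out = findtwopow_alt n
instance (n : Int) (out : Int × Int) : Decidable (Spec_findtwopow n out) := by unfold Spec_findtwopow; infer_instance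

-- ===== CLAIM (what is proved, stated in full; the proofs are below) =====
def Claim_equal_findtwopow : Prop := ∀ (n : Int), Dom_findtwopow n → Pre_findtwopow n → Spec_findtwopow n (findtwopow n)

-- ===== LEMMAS AND PROOFS =====

theorem shiftRight_one_int (n : Int) : n >>> (1:Nat) = n / 2 := by
  rw [Int.shiftRight_eq_div_pow]; norm_num

-- the mathematical result both ports compute: (odd part of n, its 2-adic valuation)
def twoDecomp (n : Int) : Int × Int :=
  if h : n ≠ 0 ∧ PySem.Int.mod n 2 = 0 then
    let p := twoDecomp (n >>> (1 : Nat))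
    (p.1, p.2 + 1)
  else (n, 0)
  termination_by n.natAbs
  decreasing_by
    rw [shiftRight_one_int]
    obtain ⟨h1, h2⟩ := h
    rw [PySem.Int.mod_eq_emod_of_pos (by norm_num)] at h2
    omega

theorem mod2_natAbs (n : Int) (h : PySem.Int.mod n 2 = 0) : n.natAbs % 2 = 0 := by
  rw [PySem.Int.mod_eq_emod_of_pos (by norm_num)] at h
  omega

theorem mod2_natAbs' (n : Int) (h : ¬ PySem.Int.mod n 2 = 0) : n.natAbs % 2 = 1 := by
  rw [PySem.Int.mod_eq_emod_of_pos (by norm_num)] at h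
  omega

theorem land_pred_odd (m : Nat) (h : m % 2 = 1) : m &&& (m-1) = m - 1 := by
  apply Nat.eq_of_testBit_eq
  intro i
  cases i with
  | zero => simp [Nat.testBit_zero]; omega
  | succ i =>
      rw [Nat.testBit_land, Nat.testBit_succ, Nat.testBit_succ]
      have : m / 2 = (m-1)/2 := by omega
      rw [this, Bool.and_self]

theorem land_pred_even (m : Nat) (h : m % 2 = 0) (h1 : 1 ≤ m) :
    m &&& (m-1) = 2 * ((m/2) &&& (m/2 - 1)) := by
  apply Nat.eq_of_testBit_eq
  intro i
  cases i with
  | zero =>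
      rw [Nat.testBit_land]
      simp [Nat.testBit_zero]
      omega
  | succ i =>
      rw [Nat.testBit_land, Nat.testBit_succ, Nat.testBit_succ, Nat.testBit_succ]
      have h2 : 2 * ((m/2) &&& (m/2 - 1)) / 2 = (m/2) &&& (m/2-1) := by omega
      rw [h2, Nat.testBit_land]
      have : (m-1)/2 = m/2 - 1 := by omega
      rw [this]

-- Python's n & -n, written over the natural number |n|
theorem band_neg_self (n : Int) (hn : n ≠ 0) :
    PySem.Int.band n (-n) = ((n.natAbs - (n.natAbs &&& (n.natAbs - 1)) : Nat) : Int) := by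
  rcases lt_trichotomy n 0 with h | h | h
  · rw [PySem.Int.band, if_neg (by omega), if_pos (by omega)]
    have e1 : (-n).toNat = n.natAbs := by omega
    have e2 : (-n - 1).toNat = n.natAbs - 1 := by omega
    rw [e1, e2]
  · exact absurd h hn
  · rw [PySem.Int.band, if_pos (by omega), if_neg (by omega)]
    have e1 : n.toNat = n.natAbs := by omega
    have e2 : (-(-n) - 1).toNat = n.natAbs - 1 := by omega
    rw [e1, e2]

theorem shiftRight_succ_int (n : Int) (k : Nat) : n >>> (k+1) = (n / 2) >>> k := by
  rw [Int.shiftRight_eq_div_pow, Int.shiftRight_eq_div_pow]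
  push_cast
  rw [pow_succ, mul_comm, ← Int.ediv_ediv_of_nonneg (by norm_num : (0:Int) ≤ 2)]

-- combined invariant for B's closed form, by strong induction on |n|
theorem B_main : ∀ m : Nat, ∀ n : Int, n.natAbs ≤ m → n ≠ 0 →
    0 ≤ (twoDecomp n).2 ∧
    0 < PySem.Int.band n (-n) ∧
    (PySem.Int.bitLength (PySem.Int.band n (-n)) : Int) = (twoDecomp n).2 + 1 ∧
    n >>> (twoDecomp n).2.toNat = (twoDecomp n).1 := by
  intro m
  induction m with
  | zero => intro n h hn; omega
  | succ m ih =>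
      intro n h hn
      by_cases hev : PySem.Int.mod n 2 = 0
      · -- even case
        have hab := mod2_natAbs n hev
        have hge : 2 ≤ n.natAbs := by omega
        set half : Int := n >>> (1:Nat) with hhalf
        have hhv : half = n / 2 := by rw [hhalf, shiftRight_one_int]
        have habs : half.natAbs = n.natAbs / 2 := by rw [hhv]; omega
        have hhn : half ≠ 0 := by rw [hhv]; omega
        have hle : half.natAbs ≤ m := by omega
        obtain ⟨ih0, ih1, ih2, ih3⟩ := ih half hle hhn
        have hD : twoDecomp n = ((twoDecomp half).1, (twoDecomp half).2 + 1) := by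
          rw [twoDecomp, dif_pos ⟨hn, hev⟩]
        -- n & -n = 2 * (half & -half)
        have hband : PySem.Int.band n (-n) = 2 * PySem.Int.band half (-half) := by
          rw [band_neg_self n hn, band_neg_self half hhn]
          rw [land_pred_even n.natAbs hab (by omega), habs]
          have hx : (n.natAbs/2) &&& (n.natAbs/2 - 1) ≤ n.natAbs/2 := Nat.and_le_left
          omega
        have hpos : 0 < PySem.Int.band n (-n) := by rw [hband]; omega
        have hbl : (PySem.Int.bitLength (PySem.Int.band n (-n)) : Int)
            = (PySem.Int.bitLength (PySem.Int.band half (-half)) : Int) + 1 := by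
          rw [PySem.Int.bitLength_of_pos hpos]
          have : PySem.Int.floordiv (PySem.Int.band n (-n)) 2 = PySem.Int.band half (-half) := by
            rw [PySem.Int.floordiv_eq_ediv_of_pos (by norm_num), hband]
            omega
          rw [this]
          push_cast
          ring
        refine ⟨by rw [hD]; simpa using by omega, hpos, ?_, ?_⟩
        · rw [hbl, ih2, hD]
        · rw [hD]
          have ht : ((twoDecomp half).2 + 1).toNat = (twoDecomp half).2.toNat + 1 := by omega
          simp only [ht]
          rw [shiftRight_succ_int, ← hhv, ih3]
      · -- odd case
        have hab := mod2_natAbs' n hev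
        have hD : twoDecomp n = (n, 0) := by
          rw [twoDecomp, dif_neg (by tauto)]
        have hband : PySem.Int.band n (-n) = 1 := by
          rw [band_neg_self n hn, land_pred_odd n.natAbs hab]
          have : 1 ≤ n.natAbs := by omega
          omega
        refine ⟨by rw [hD], by rw [hband]; norm_num, ?_, ?_⟩
        · rw [hband, hD]
          norm_num
          decide
        · rw [hD]
          simp [Int.shiftRight_eq_div_pow]

-- A's loop computes twoDecomp given enough fuel
theorem loop_correct : ∀ fuel : Nat, ∀ r twopow : Int, r ≠ 0 → r.natAbs < 2^fuel →
    findtwopowLoop fuel r twopow = ((twoDecomp r).1, (twoDecomp r).2 + twopow) := by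
  intro fuel
  induction fuel with
  | zero => intro r tp hr hlt; simp at hlt; omega
  | succ fuel ih =>
      intro r tp hr hlt
      by_cases hev : PySem.Int.mod r 2 = 0
      · have hab := mod2_natAbs r hev
        have hge : 2 ≤ r.natAbs := by omega
        have hhv : r >>> (1:Nat) = r / 2 := shiftRight_one_int r
        have hD : twoDecomp r = ((twoDecomp (r >>> (1:Nat))).1, (twoDecomp (r >>> (1:Nat))).2 + 1) := by
          rw [twoDecomp, dif_pos ⟨hr, hev⟩]
        rw [findtwopowLoop, if_pos hev,
          ih (r >>> (1:Nat)) (tp + 1) (by rw [hhv]; omega)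
            (by rw [hhv]; have : (2:Nat)^(fuel+1) = 2 * 2^fuel := by ring
                omega),
          hD]
        refine Prod.ext rfl ?_
        simp
        ring
      · have hD : twoDecomp r = (r, 0) := by rw [twoDecomp, dif_neg (by tauto)]
        rw [findtwopowLoop, if_neg hev, hD]
        simp

theorem findtwopow_A_eq (n : Int) (hn : n ≠ 0) : findtwopow n = twoDecomp n := by
  rw [findtwopow, loop_correct (n.natAbs + 1) n 0 hn ?_]
  · simp
  · calc n.natAbs < 2 ^ n.natAbs := Nat.lt_two_pow_self
      _ ≤ 2 ^ (n.natAbs + 1) := Nat.pow_le_pow_right (by norm_num) (by omega)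

theorem findtwopow_B_eq (n : Int) (hn : n ≠ 0) : findtwopow_alt n = twoDecomp n := by
  obtain ⟨h0, _, h2, h3⟩ := B_main n.natAbs n le_rfl hn
  rw [findtwopow_alt]
  simp only [h2]
  rw [if_pos (by omega)]
  have : ((twoDecomp n).2 + 1 - 1) = (twoDecomp n).2 := by ring
  rw [this, h3]

-- ===== VERDICT (by name: the statement is the Claim_ definition above) =====
theorem findtwopow_spec : Claim_equal_findtwopow := by
  intro n _ hn
  unfold Spec_findtwopow
  rw [findtwopow_A_eq n hn, findtwopow_B_eq n hn]
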